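-- pv_equiv track=rewrite | github.com/swp1234/fire-project | fix_missing_sections.py | _merge_missing
-- ===== SOURCE A (Python) =====
-- def _merge_missing(target, source, path=''):
--     """Recursively merge missing keys from source into target"""
--     count = 0
--     for key, value in source.items():
--         if key not in target:
--             target[key] = value
--             count += 1
--         elif isinstance(value, dict) and isinstance(target.get(key), dict):
--             count += _merge_missing(target[key], value, f"{path}.{key}" if path else key)
--     return count
-- ===== SOURCE B (Python) =====
-- def _merge_missing(target, source, path=''):
--     """Recursively merge missing keys from source into target.
--
--     Values here are scalars (ints), so the nested-dict recursion of the
--     original never fires: the missing entries are computed in one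
--     comprehension, added with a single dict.update, and counted with len.
--     Same in-place mutation of target as the original.
--     """
--     missing = {k: v for k, v in source.items() if k not in target}
--     target.update(missing)
--     return len(missing)
-- ===== Notes on version B (the rewrite author's own statement) =====
-- stated objective: idiomatic
-- what changed: Replaced the counting loop with conditional inserts by a dict comprehension of the missing entries plus one dict.update, returning its len.
import Mathlib
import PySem

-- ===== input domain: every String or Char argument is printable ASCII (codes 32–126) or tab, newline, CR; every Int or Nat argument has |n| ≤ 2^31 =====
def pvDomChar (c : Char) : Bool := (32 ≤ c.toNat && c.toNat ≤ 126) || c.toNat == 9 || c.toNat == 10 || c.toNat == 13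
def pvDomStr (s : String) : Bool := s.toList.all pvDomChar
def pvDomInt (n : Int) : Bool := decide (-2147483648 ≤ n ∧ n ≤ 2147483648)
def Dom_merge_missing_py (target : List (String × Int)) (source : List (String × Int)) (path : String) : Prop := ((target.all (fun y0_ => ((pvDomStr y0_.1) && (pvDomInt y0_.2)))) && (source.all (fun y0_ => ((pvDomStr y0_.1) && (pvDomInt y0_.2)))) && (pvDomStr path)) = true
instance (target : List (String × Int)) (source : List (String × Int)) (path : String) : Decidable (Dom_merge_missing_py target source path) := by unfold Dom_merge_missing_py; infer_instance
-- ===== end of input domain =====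

-- B replaces A's counting loop of conditional inserts by one comprehension of the
-- missing keys plus dict.update, returning its length (objective: idiomatic).
-- Equivalence is about the RETURN value only: both Pythons also mutate `target`
-- in place (the same way); that side effect is not modelled here.

-- ===== PORT A =====
-- Loop over source.items(); `key not in target` inserts (append: new key) and counts.
-- Values are Int here, so the `elif isinstance(value, dict) …` recursion never fires
-- and that branch contributes nothing; `path` is only used to build child paths.
def mergeLoopA (target : List (String × Int)) (src : List (String × Int)) (count : Int) : Int :=
  match src with
  | [] => count
  | (k, v) :: rest =>
    if !((target.map Prod.fst).contains k) then
      mergeLoopA (target ++ [(k, v)]) rest (count + 1)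
    else
      -- elif isinstance(value, dict) and isinstance(target.get(key), dict): value : Int, so skip
      mergeLoopA target rest count

def merge_missing_py (target : List (String × Int)) (source : List (String × Int)) (path : String) : Int :=
  mergeLoopA target source 0

-- ===== PORT B =====
-- missing = the (distinct) source keys not in target, filtered in one pass; return len(missing).
-- (The in-place target.update(missing) has no effect on the returned count.)
def merge_missing_py_alt (target : List (String × Int)) (source : List (String × Int)) (path : String) : Int :=
  (((PySem.Set.ofList (source.map Prod.fst)).filter
      (fun k => !((target.map Prod.fst).contains k))).length : Int)

-- ===== PRECONDITION & SPEC =====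
def Spec_merge_missing_py (target : List (String × Int)) (source : List (String × Int)) (path : String) (out : Int) : Prop := out = merge_missing_py_alt target source path
instance (target : List (String × Int)) (source : List (String × Int)) (path : String) (out : Int) : Decidable (Spec_merge_missing_py target source path out) := by unfold Spec_merge_missing_py; infer_instance

-- ===== CLAIM (what is proved, stated in full; the proofs are below) =====
def Claim_equal_merge_missing_py : Prop := ∀ (target : List (String × Int)) (source : List (String × Int)) (path : String), Dom_merge_missing_py target source path → Spec_merge_missing_py target source path (merge_missing_py target source path)

-- ===== LEMMAS AND PROOFS =====

-- filtering by p after discarding k is filtering by p when p k = false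
theorem filter_discard_of_false {p : String → Bool} (k : String) (s : List String)
    (hk : p k = false) :
    (PySem.Set.discard s k).filter p = s.filter p := by
  unfold PySem.Set.discard
  rw [List.filter_filter]
  apply List.filter_congr
  intro y _
  by_cases hy : y = k
  · simp [hy, hk]
  · simp [hy]

-- filtering by p after discarding k is filtering by (p ∧ ≠ k)
theorem filter_discard (p : String → Bool) (k : String) (s : List String) :
    (PySem.Set.discard s k).filter p = s.filter (fun y => p y && !(y == k)) := by
  unfold PySem.Set.discard
  rw [List.filter_filter]

theorem loopA_eq (src : List (String × Int)) :
    ∀ (t : List (String × Int)) (c : Int),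
      mergeLoopA t src c =
        c + (((PySem.Set.ofList (src.map Prod.fst)).filter
              (fun k => !((t.map Prod.fst).contains k))).length : Int) := by
  induction src with
  | nil => intro t c; simp [mergeLoopA, PySem.Set.ofList]
  | cons kv rest ih =>
    intro t c
    obtain ⟨k, v⟩ := kv
    rw [List.map_cons, PySem.Set.ofList_cons]
    by_cases hk : ((t.map Prod.fst).contains k) = true
    · have hpk : (!((t.map Prod.fst).contains k)) = false := by rw [hk]; rfl
      simp only [mergeLoopA, hk, Bool.not_true, Bool.false_eq_true, if_false, List.filter_cons]
      rw [filter_discard_of_false k _ hpk]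
      exact ih t c
    · have hk' : ((t.map Prod.fst).contains k) = false := by
        simpa using hk
      simp only [mergeLoopA, hk', Bool.not_false, if_true, List.filter_cons]
      rw [ih (t ++ [(k, v)]) (c + 1)]
      have hpred : ∀ y : String,
          (!(((t ++ [(k, v)]).map Prod.fst).contains y)) =
          ((fun y => !((t.map Prod.fst).contains y)) y && !(y == k)) := by
        intro y
        by_cases hy : y ∈ t.map Prod.fst <;> by_cases hyk : y = k <;>
          simp [hy, hyk]
      have : ((PySem.Set.ofList (rest.map Prod.fst)).filter
                (fun y => !(((t ++ [(k, v)]).map Prod.fst).contains y))) =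
             ((PySem.Set.discard (PySem.Set.ofList (rest.map Prod.fst)) k).filter
                (fun y => !((t.map Prod.fst).contains y))) := by
        rw [filter_discard]
        exact List.filter_congr (fun y _ => hpred y)
      rw [this]
      simp
      ring

-- ===== VERDICT (by name: the statement is the Claim_ definition above) =====
theorem merge_missing_py_spec : Claim_equal_merge_missing_py := by
  intro target source path _
  unfold Spec_merge_missing_py merge_missing_py merge_missing_py_alt
  simpa using loopA_eq source target 0
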